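-- pv_equiv track=rewrite | github.com/melnikovknst/HIV-DB_PROJECT | demo_seed.py | build_encounter_patient_sequence
-- ===== SOURCE A (Python) =====
-- def build_encounter_patient_sequence(patient_ids, needed):
--     sequence = [1, 1, 1, 2, 3, 4, 5, 1, 6, 7, 8, 9, 10]
--     index = 0
--     while len(sequence) < needed:
--         sequence.append(patient_ids[index % len(patient_ids)])
--         if index % 4 == 0:
--             sequence.append(patient_ids[(index * 7 + 3) % len(patient_ids)])
--         index += 1
--     return sequence[:needed]
-- ===== SOURCE B (Python) =====
-- def build_encounter_patient_sequence(patient_ids, needed):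
--     seed = [1, 1, 1, 2, 3, 4, 5, 1, 6, 7, 8, 9, 10]
--     if needed <= len(seed):
--         return seed[:needed]
--     n = len(patient_ids)
--     def elem(j):
--         # tail position j maps closed-form to a source index: each group of 4 loop
--         # indices i = 4q..4q+3 yields the 5 tail slots 5q..5q+4
--         q, r = divmod(j, 5)
--         if r == 0:
--             return patient_ids[(4 * q) % n]
--         if r == 1:
--             return patient_ids[(28 * q + 3) % n]
--         return patient_ids[(4 * q + r - 1) % n]
--     return seed + [elem(j) for j in range(needed - len(seed))]
-- ===== Notes on version B (the rewrite author's own statement) =====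
-- stated objective: alternative
-- what changed: Replaces A's sequential grow-until-length while loop (mutable list, running index, conditional extra append) by a closed-form random-access formula: each tail position j is mapped directly to its source index via j = 5q+r (each group of 4 loop indices fills exactly 5 slots), so the tail is built positionally with no overshoot or trimming.
import Mathlib
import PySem

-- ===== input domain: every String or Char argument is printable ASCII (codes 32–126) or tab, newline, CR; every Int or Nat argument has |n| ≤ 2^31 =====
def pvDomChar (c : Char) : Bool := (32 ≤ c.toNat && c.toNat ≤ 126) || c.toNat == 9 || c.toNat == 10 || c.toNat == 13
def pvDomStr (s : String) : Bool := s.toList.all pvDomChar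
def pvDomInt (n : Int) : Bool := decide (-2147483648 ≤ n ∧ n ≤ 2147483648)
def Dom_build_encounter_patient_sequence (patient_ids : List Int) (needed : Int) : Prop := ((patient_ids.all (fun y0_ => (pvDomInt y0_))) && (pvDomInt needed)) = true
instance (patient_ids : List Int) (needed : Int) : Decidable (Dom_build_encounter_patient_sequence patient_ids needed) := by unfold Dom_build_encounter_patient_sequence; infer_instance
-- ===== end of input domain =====

-- B replaces A's sequential grow-until-length while loop by a closed-form positional formula
-- (tail slot j = 5q+r comes straight from source index arithmetic), built without overshoot or
-- trimming (objective: alternative).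

-- ===== PORT A =====
-- A's while loop; patient_ids[e % len(patient_ids)] is pyGet? ∘ Int.mod; the '.getD 0' is only
-- reached where Python raises ZeroDivisionError (patient_ids = [] and the loop runs), excluded by Pre_.
def pvALoop (patient_ids : List Int) (needed : Int) (sequence : List Int) (index : Int) : List Int :=
  if h : (sequence.length : Int) < needed then
    pvALoop patient_ids needed
      (sequence
        ++ [(PySem.List.pyGet? patient_ids (PySem.Int.mod index (patient_ids.length : Int))).getD 0]
        ++ (if PySem.Int.mod index 4 = 0 then
              [(PySem.List.pyGet? patient_ids (PySem.Int.mod (index * 7 + 3) (patient_ids.length : Int))).getD 0]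
            else []))
      (index + 1)
  else sequence
termination_by (needed - sequence.length).toNat
decreasing_by
  simp only [List.length_append, List.length_cons, List.length_nil]
  split <;> simp <;> omega

def build_encounter_patient_sequence (patient_ids : List Int) (needed : Int) : List Int :=
  PySem.List.slice (pvALoop patient_ids needed [1, 1, 1, 2, 3, 4, 5, 1, 6, 7, 8, 9, 10] 0) none (some needed)

-- ===== PORT B =====
-- B's closed-form element helper: tail position j = 5*q + r; r = 0 is the main element of source
-- index 4q, r = 1 its companion extra, r ∈ {2,3,4} the main element of source index 4q + r - 1.
def pvBElem (patient_ids : List Int) (n : Int) (j : Int) : Int :=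
  let q := PySem.Int.floordiv j 5
  let r := PySem.Int.mod j 5
  if r = 0 then (PySem.List.pyGet? patient_ids (PySem.Int.mod (4 * q) n)).getD 0
  else if r = 1 then (PySem.List.pyGet? patient_ids (PySem.Int.mod (28 * q + 3) n)).getD 0
  else (PySem.List.pyGet? patient_ids (PySem.Int.mod (4 * q + r - 1) n)).getD 0

def build_encounter_patient_sequence_alt (patient_ids : List Int) (needed : Int) : List Int :=
  let seed : List Int := [1, 1, 1, 2, 3, 4, 5, 1, 6, 7, 8, 9, 10]
  if needed ≤ (seed.length : Int) then PySem.List.slice seed none (some needed)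
  else
    seed ++ (PySem.List.pyRange 0 (needed - (seed.length : Int)) 1).map
      (pvBElem patient_ids (patient_ids.length : Int))

-- ===== PRECONDITION & SPEC =====
-- Pre_ excludes patient_ids = [] with needed > 13, where A (and B) raise ZeroDivisionError.
def Pre_build_encounter_patient_sequence (patient_ids : List Int) (needed : Int) : Prop :=
  patient_ids ≠ [] ∨ needed ≤ 13
instance (patient_ids : List Int) (needed : Int) : Decidable (Pre_build_encounter_patient_sequence patient_ids needed) := by unfold Pre_build_encounter_patient_sequence; infer_instance

def pvWitness_build_encounter_patient_sequence : List Int × Int := ([1, 2], 20)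

def Spec_build_encounter_patient_sequence (patient_ids : List Int) (needed : Int) (out : List Int) : Prop := out = build_encounter_patient_sequence_alt patient_ids needed
instance (patient_ids : List Int) (needed : Int) (out : List Int) : Decidable (Spec_build_encounter_patient_sequence patient_ids needed out) := by unfold Spec_build_encounter_patient_sequence; infer_instance

-- ===== CLAIM (what is proved, stated in full; the proofs are below) =====
def Claim_equal_build_encounter_patient_sequence : Prop := ∀ (patient_ids : List Int) (needed : Int), Dom_build_encounter_patient_sequence patient_ids needed → Pre_build_encounter_patient_sequence patient_ids needed → Spec_build_encounter_patient_sequence patient_ids needed (build_encounter_patient_sequence patient_ids needed)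

-- ===== LEMMAS AND PROOFS =====

-- proof helper: the two items A's loop body appends at one index
def pvBBlock (patient_ids : List Int) (i : Int) : List Int :=
  [(PySem.List.pyGet? patient_ids (PySem.Int.mod i (patient_ids.length : Int))).getD 0]
  ++ (if PySem.Int.mod i 4 = 0 then
        [(PySem.List.pyGet? patient_ids (PySem.Int.mod (i * 7 + 3) (patient_ids.length : Int))).getD 0]
      else [])

-- proof helper: what K consecutive loop iterations starting at `index` append
def pvStream (patient_ids : List Int) (index : Int) : Nat → List Int
  | 0 => []
  | k + 1 => pvBBlock patient_ids index ++ pvStream patient_ids (index + 1) k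

lemma pvStream_add (p : List Int) : ∀ (j k : Nat) (a : Int),
    pvStream p a (j + k) = pvStream p a j ++ pvStream p (a + j) k := by
  intro j
  induction j with
  | zero => intro k a; simp [pvStream]
  | succ m ih =>
    intro k a
    rw [show m + 1 + k = (m + k) + 1 from by omega]
    simp only [pvStream, ih k (a + 1), List.append_assoc]
    have hx : a + ((m : Int) + 1) = a + 1 + (m : Int) := by ring
    push_cast [hx]
    rfl

lemma pvALoop_take (pids : List Int) (needed : Int) : ∀ (K : Nat) (seq : List Int) (index : Int),
    (needed - seq.length).toNat ≤ K →
    (pvALoop pids needed seq index).take needed.toNat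
      = (seq ++ pvStream pids index K).take needed.toNat := by
  intro K
  induction K with
  | zero =>
    intro seq index hK
    have hle : needed ≤ (seq.length : Int) := by omega
    rw [pvALoop, dif_neg (by omega)]
    simp only [pvStream, List.append_nil]
  | succ k ih =>
    intro seq index hK
    by_cases h : (seq.length : Int) < needed
    · rw [pvALoop, dif_pos h]
      have hb : pvBBlock pids index
          = [(PySem.List.pyGet? pids (PySem.Int.mod index (pids.length : Int))).getD 0]
            ++ (if PySem.Int.mod index 4 = 0 then
                  [(PySem.List.pyGet? pids (PySem.Int.mod (index * 7 + 3) (pids.length : Int))).getD 0]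
                else []) := rfl
      have hlen : 1 ≤ (pvBBlock pids index).length := by
        rw [hb]; split <;> simp
      rw [List.append_assoc, ← hb]
      rw [ih (seq ++ pvBBlock pids index) (index + 1) (by simp; omega)]
      simp [pvStream, List.append_assoc]
    · rw [pvALoop, dif_neg h]
      have hle : needed.toNat ≤ seq.length := by omega
      rw [List.take_append_of_le_length hle]

lemma pvBElem_at (p : List Int) (n : Int) (q t : Int) (ht0 : 0 ≤ t) (ht : t < 5) :
    pvBElem p n (5 * q + t)
      = if t = 0 then (PySem.List.pyGet? p (PySem.Int.mod (4 * q) n)).getD 0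
        else if t = 1 then (PySem.List.pyGet? p (PySem.Int.mod (28 * q + 3) n)).getD 0
        else (PySem.List.pyGet? p (PySem.Int.mod (4 * q + t - 1) n)).getD 0 := by
  have hdiv : PySem.Int.floordiv (5 * q + t) 5 = q := by
    rw [PySem.Int.floordiv_eq_ediv_of_pos (by norm_num)]; omega
  have hmod : PySem.Int.mod (5 * q + t) 5 = t := by
    rw [PySem.Int.mod_eq_emod_of_pos (by norm_num)]; omega
  simp only [pvBElem, hdiv, hmod]

lemma pvStream_four (p : List Int) (q : Int) :
    pvStream p (4 * q) 4
      = [(PySem.List.pyGet? p (PySem.Int.mod (4 * q) (p.length : Int))).getD 0,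
         (PySem.List.pyGet? p (PySem.Int.mod (28 * q + 3) (p.length : Int))).getD 0,
         (PySem.List.pyGet? p (PySem.Int.mod (4 * q + 1) (p.length : Int))).getD 0,
         (PySem.List.pyGet? p (PySem.Int.mod (4 * q + 2) (p.length : Int))).getD 0,
         (PySem.List.pyGet? p (PySem.Int.mod (4 * q + 3) (p.length : Int))).getD 0] := by
  have m0 : PySem.Int.mod (4 * q) 4 = 0 := by
    rw [PySem.Int.mod_eq_emod_of_pos (by norm_num)]; omega
  have m1 : PySem.Int.mod (4 * q + 1) 4 ≠ 0 := by
    rw [PySem.Int.mod_eq_emod_of_pos (by norm_num)]; omega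
  have m2 : PySem.Int.mod (4 * q + 1 + 1) 4 ≠ 0 := by
    rw [PySem.Int.mod_eq_emod_of_pos (by norm_num)]; omega
  have m3 : PySem.Int.mod (4 * q + 1 + 1 + 1) 4 ≠ 0 := by
    rw [PySem.Int.mod_eq_emod_of_pos (by norm_num)]; omega
  have e1 : 4 * q * 7 + 3 = 28 * q + 3 := by ring
  have e2 : 4 * q + 1 + 1 = 4 * q + 2 := by ring
  have e3 : 4 * q + 2 + 1 = 4 * q + 3 := by ring
  simp only [pvStream, pvBBlock]
  rw [if_pos m0, if_neg m1, if_neg m2, if_neg m3]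
  simp [e1, e2, e3]

lemma pvStream_eq_map (p : List Int) : ∀ Q : Nat,
    pvStream p 0 (4 * Q) = (List.range (5 * Q)).map (fun k : Nat => pvBElem p (p.length : Int) (k : Int)) := by
  intro Q
  induction Q with
  | zero => simp [pvStream]
  | succ m ih =>
    have h4 : 4 * (m + 1) = 4 * m + 4 := by ring
    have h5 : 5 * (m + 1) = 5 * m + 5 := by ring
    rw [h4, h5, pvStream_add p (4 * m) 4 0, ih, List.range_add, List.map_append, List.map_map]
    congr 1
    have hz : (0 : Int) + ((4 * m : Nat) : Int) = 4 * (m : Int) := by push_cast; ring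
    rw [hz, pvStream_four p (m : Int)]
    rw [show List.range 5 = [0, 1, 2, 3, 4] from rfl]
    simp only [List.map_cons, List.map_nil, Function.comp]
    have g0 := pvBElem_at p (p.length : Int) (m : Int) 0 (by norm_num) (by norm_num)
    have g1 := pvBElem_at p (p.length : Int) (m : Int) 1 (by norm_num) (by norm_num)
    have g2 := pvBElem_at p (p.length : Int) (m : Int) 2 (by norm_num) (by norm_num)
    have g3 := pvBElem_at p (p.length : Int) (m : Int) 3 (by norm_num) (by norm_num)
    have g4 := pvBElem_at p (p.length : Int) (m : Int) 4 (by norm_num) (by norm_num)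
    norm_num at g0 g1 g2 g3 g4 ⊢
    rw [g0, g1, g2, g3, g4]
    refine ⟨rfl, rfl, ?_, ?_, ?_⟩ <;> ring_nf

-- ===== VERDICT (by name: the statement is the Claim_ definition above) =====
theorem build_encounter_patient_sequence_spec : Claim_equal_build_encounter_patient_sequence := by
  intro pids needed _ _
  unfold Spec_build_encounter_patient_sequence
  simp only [build_encounter_patient_sequence, build_encounter_patient_sequence_alt]
  by_cases hn : needed ≤ 13
  · rw [pvALoop, dif_neg (by simp; omega)]
    simp only [List.length_cons, List.length_nil]
    rw [if_pos (by push_cast; omega)]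
  · have h0 : (0 : Int) ≤ needed := by omega
    rw [PySem.List.slice_to _ h0]
    simp only [List.length_cons, List.length_nil]
    rw [if_neg (by push_cast; omega)]
    set extra : Nat := (needed - 13).toNat with hextra
    have hK : (needed - ([1, 1, 1, 2, 3, 4, 5, 1, 6, 7, 8, 9, 10] : List Int).length).toNat ≤ 4 * extra := by
      simp; omega
    rw [pvALoop_take pids needed (4 * extra) _ 0 hK]
    have hN : needed.toNat = ([1, 1, 1, 2, 3, 4, 5, 1, 6, 7, 8, 9, 10] : List Int).length + extra := by
      simp; omega
    rw [hN, List.take_length_add_append]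
    rw [pvStream_eq_map pids (extra)]
    rw [← List.map_take, List.take_range]
    have hmin : min extra (5 * extra) = extra := by omega
    rw [hmin]
    have hr : needed - ((13 : Nat) : Int) = ((extra : Nat) : Int) - 0 := by push_cast; omega
    rw [PySem.List.pyRange_one 0 (needed - ((13 : Nat) : Int))]
    rw [hr]
    simp
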